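-- pv_equiv track=rewrite | github.com/zack256/caydio | app/utils.py | format_tag_name
-- ===== SOURCE A (Python) =====
-- def format_tag_name(name):
--     new_name = ""
--     for c in name:
--         if c.isalnum():
--             new_name += c.lower()
--         else:
--             new_name += "-"
--     good_name = ""
--     for c, el in enumerate(new_name):
--         if el != "-":
--             good_name += el
--         elif good_name and good_name[-1] != "-":
--             good_name += "-"
--     if good_name and good_name[-1] == "-":
--         return good_name[:-1]
--     return good_name
-- ===== SOURCE B (Python) =====
-- def format_tag_name(name):
--     tokens = []
--     cur = ""
--     for c in name:
--         if c.isalnum():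
--             cur += c.lower()
--         elif cur:
--             tokens.append(cur)
--             cur = ""
--     if cur:
--         tokens.append(cur)
--     return "-".join(tokens)
-- ===== Notes on version B (the rewrite author's own statement) =====
-- stated objective: faster
-- what changed: Single pass collecting lowercase alnum tokens that are joined with dashes, instead of A's two passes (dash substitution, then dash-run collapsing) plus a final trailing-dash strip.
import Mathlib
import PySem

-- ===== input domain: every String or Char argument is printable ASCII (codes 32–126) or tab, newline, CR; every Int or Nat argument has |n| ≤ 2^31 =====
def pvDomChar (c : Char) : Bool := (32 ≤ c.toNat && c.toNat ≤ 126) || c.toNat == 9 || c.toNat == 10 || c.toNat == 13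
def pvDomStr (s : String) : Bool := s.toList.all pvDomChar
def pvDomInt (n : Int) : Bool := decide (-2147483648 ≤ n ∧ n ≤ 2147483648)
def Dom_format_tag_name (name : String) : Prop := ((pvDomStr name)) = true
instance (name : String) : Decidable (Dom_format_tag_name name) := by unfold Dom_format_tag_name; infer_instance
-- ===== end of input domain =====

-- B replaces A's two passes (dash substitution, then dash-run collapse, then trailing-dash strip)
-- by one faster pass collecting lowercased alnum tokens joined with dashes; return values proved equal on Dom.

-- ===== PORT A =====
-- literal port of A over the character list; the enumerate index `c` of the second
-- Python loop is unused by A's body and is therefore not carried by the fold.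
def format_tag_name (name : String) : String :=
  let new_name : List Char := name.toList.foldl
    (fun acc c => if PySem.Chars.isalnum c then acc ++ [PySem.Chars.lowerChar c] else acc ++ ['-']) []
  let good_name : List Char := new_name.foldl
    (fun g el => if el ≠ '-' then g ++ [el]
      else if g ≠ [] ∧ g.getLast? ≠ some '-' then g ++ ['-'] else g) []
  if good_name ≠ [] ∧ good_name.getLast? = some '-' then String.ofList good_name.dropLast
  else String.ofList good_name

-- ===== PORT B =====
-- literal port of Source B: state = (tokens, cur); flush cur on a separator, then dash-join.
def format_tag_name_alt (name : String) : String :=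
  let st : List String × List Char := name.toList.foldl
    (fun st c =>
      if PySem.Chars.isalnum c then (st.1, st.2 ++ [PySem.Chars.lowerChar c])
      else if st.2 ≠ [] then (st.1 ++ [String.ofList st.2], []) else st)
    ([], [])
  let tokens : List String := if st.2 ≠ [] then st.1 ++ [String.ofList st.2] else st.1
  PySem.Str.join "-" tokens

-- ===== PRECONDITION & SPEC =====
def Spec_format_tag_name (name : String) (out : String) : Prop := out = format_tag_name_alt name
instance (name : String) (out : String) : Decidable (Spec_format_tag_name name out) := by unfold Spec_format_tag_name; infer_instance

-- ===== CLAIM (what is proved, stated in full; the proofs are below) =====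
def Claim_equal_format_tag_name : Prop := ∀ (name : String), Dom_format_tag_name name → Spec_format_tag_name name (format_tag_name name)

-- ===== LEMMAS AND PROOFS =====

def pvF (c : Char) : Char := if PySem.Chars.isalnum c then PySem.Chars.lowerChar c else '-'

def pvStepA (g : List Char) (el : Char) : List Char :=
  if el ≠ '-' then g ++ [el]
  else if g ≠ [] ∧ g.getLast? ≠ some '-' then g ++ ['-'] else g

def pvStepB (st : List String × List Char) (c : Char) : List String × List Char :=
  if PySem.Chars.isalnum c then (st.1, st.2 ++ [PySem.Chars.lowerChar c])
  else if st.2 ≠ [] then (st.1 ++ [String.ofList st.2], []) else st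

def pvRender (ts : List String) (cur : List Char) : List Char :=
  (ts.flatMap (fun t => t.toList ++ ['-'])) ++ cur

theorem pvLowerNe (c : Char) (h : PySem.Chars.isalnum c = true) : PySem.Chars.lowerChar c ≠ '-' := by
  unfold PySem.Chars.lowerChar
  split
  · rename_i hu
    simp only [PySem.Chars.isupper, Bool.and_eq_true, decide_eq_true_eq, Char.le_def,
      UInt32.le_iff_toNat_le] at hu
    have hu' : 65 ≤ c.toNat ∧ c.toNat ≤ 90 := hu
    intro hEq
    have h2 := congrArg Char.toNat hEq
    rw [Char.toNat_ofNat] at h2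
    rw [if_pos (Or.inl (by omega))] at h2
    have : ('-').toNat = 45 := rfl
    omega
  · intro hEq; subst hEq
    simp [PySem.Chars.isalnum, PySem.Chars.isalpha, PySem.Chars.isdigit, PySem.Chars.isupper,
      PySem.Chars.islower] at h

theorem pvMapLoop (l : List Char) (acc : List Char) :
    l.foldl (fun acc c => if PySem.Chars.isalnum c then acc ++ [PySem.Chars.lowerChar c]
      else acc ++ ['-']) acc = acc ++ l.map pvF := by
  induction l generalizing acc with
  | nil => simp
  | cons c t ih =>
    simp only [List.foldl_cons, List.map_cons]
    rw [ih]
    by_cases hc : PySem.Chars.isalnum c = true <;> simp [pvF, hc]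

theorem pvRenderLast (ts : List String) (cur : List Char) (hc : cur ≠ []) :
    (pvRender ts cur).getLast? = cur.getLast? := by
  cases hx : cur.getLast? with
  | none => exact absurd (List.getLast?_eq_none_iff.mp hx) hc
  | some a => simp [pvRender, List.getLast?_append, hx]

theorem pvFlatLast (ts : List String) (hts : ts ≠ []) :
    (ts.flatMap (fun t => t.toList ++ ['-'])).getLast? = some '-' := by
  obtain ⟨ts', t, rfl⟩ := (List.eq_nil_or_concat ts).resolve_left hts
  rw [List.concat_eq_append, List.flatMap_append]
  simp [List.getLast?_append]

theorem pvLoop (l : List Char) (ts : List String) (cur : List Char)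
    (h : ∀ x ∈ cur, x ≠ '-') :
    List.foldl pvStepA (pvRender ts cur) (l.map pvF)
        = pvRender (List.foldl pvStepB (ts, cur) l).1 (List.foldl pvStepB (ts, cur) l).2
      ∧ ∀ x ∈ (List.foldl pvStepB (ts, cur) l).2, x ≠ '-' := by
  induction l generalizing ts cur with
  | nil => exact ⟨rfl, h⟩
  | cons c t ih =>
    simp only [List.map_cons, List.foldl_cons]
    by_cases hc : PySem.Chars.isalnum c = true
    · have hne := pvLowerNe c hc
      have e1 : pvStepA (pvRender ts cur) (pvF c)
          = pvRender ts (cur ++ [PySem.Chars.lowerChar c]) := by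
        simp [pvStepA, pvF, hc, hne, pvRender]
      have e2 : pvStepB (ts, cur) c = (ts, cur ++ [PySem.Chars.lowerChar c]) := by
        simp [pvStepB, hc]
      rw [e1, e2]
      refine ih ts _ ?_
      intro x hx
      rcases List.mem_append.mp hx with hx | hx
      · exact h x hx
      · simp at hx; subst hx; exact hne
    · have hf : pvF c = '-' := by simp [pvF, hc]
      by_cases hcur : cur = []
      · subst hcur
        have e2 : pvStepB (ts, []) c = (ts, []) := by simp [pvStepB, hc]
        have e1 : pvStepA (pvRender ts []) (pvF c) = pvRender ts [] := by
          rw [hf]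
          by_cases hts : ts = []
          · subst hts; simp [pvStepA, pvRender]
          · have := pvFlatLast ts hts
            simp [pvStepA, pvRender, this]
        rw [e1, e2]
        exact ih ts [] (by simp)
      · have e2 : pvStepB (ts, cur) c = (ts ++ [String.ofList cur], []) := by
          simp [pvStepB, hc, hcur]
        have e1 : pvStepA (pvRender ts cur) (pvF c)
            = pvRender (ts ++ [String.ofList cur]) [] := by
          rw [hf]
          have hg : pvRender ts cur ≠ [] := by simp [pvRender, hcur]
          have hlast : (pvRender ts cur).getLast? = cur.getLast? := pvRenderLast ts cur hcur
          obtain ⟨a, ha⟩ := Option.isSome_iff_exists.mp (List.getLast?_isSome.mpr hcur)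
          have hane : a ≠ '-' := h a (List.mem_of_getLast? ha)
          have hcond : (pvRender ts cur).getLast? ≠ some '-' := by
            rw [hlast, ha]; simp [hane]
          simp only [pvStepA, ne_eq, not_true_eq_false, if_false]
          rw [if_pos ⟨hg, hcond⟩]
          simp [pvRender, List.flatMap_append, List.append_assoc]
        rw [e1, e2]
        exact ih _ [] (by simp)

theorem pvJoin (xs : List (List Char)) (cur : List Char) :
    PySem.Chars.join ['-'] (xs ++ [cur]) = xs.flatMap (fun t => t ++ ['-']) ++ cur := by
  induction xs with
  | nil => simp [PySem.Chars.join_singleton]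
  | cons a xs ih =>
    cases xs with
    | nil => simp [PySem.Chars.join_cons_cons, PySem.Chars.join_singleton]
    | cons b ys =>
      rw [List.cons_append, List.cons_append, PySem.Chars.join_cons_cons]
      rw [← List.cons_append, ih]
      simp [List.flatMap_cons, List.append_assoc]

-- ===== VERDICT (by name: the statement is the Claim_ definition above) =====
theorem format_tag_name_spec : Claim_equal_format_tag_name := by
  intro name _
  unfold Spec_format_tag_name
  show (fun good : List Char =>
      if good ≠ [] ∧ good.getLast? = some '-' then String.ofList good.dropLast
      else String.ofList good)
    (List.foldl pvStepA (pvRender [] [])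
      (List.foldl (fun acc c => if PySem.Chars.isalnum c then acc ++ [PySem.Chars.lowerChar c]
        else acc ++ ['-']) [] name.toList))
    = (fun st : List String × List Char =>
        PySem.Str.join "-" (if st.2 ≠ [] then st.1 ++ [String.ofList st.2] else st.1))
      (List.foldl pvStepB ([], []) name.toList)
  rw [pvMapLoop name.toList [], List.nil_append]
  obtain ⟨hg, hcur⟩ := pvLoop name.toList [] [] (by simp)
  rcases hpair : List.foldl pvStepB ([], []) name.toList with ⟨ts1, cur1⟩
  rw [hpair] at hg hcur
  rw [hg]
  dsimp only
  by_cases hc : cur1 = []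
  · subst hc
    conv_rhs => rw [if_neg (show ¬(([] : List Char) ≠ []) from by simp)]
    by_cases hts : ts1 = []
    · subst hts
      simp [pvRender, PySem.Str.join, PySem.Chars.join_nil]
    · obtain ⟨xs, t, rfl⟩ := (List.eq_nil_or_concat ts1).resolve_left hts
      have hflat : pvRender (xs.concat t) [] =
          (xs.map String.toList).flatMap (fun u => u ++ ['-']) ++ t.toList ++ ['-'] := by
        simp [pvRender, List.concat_eq_append, List.flatMap_append, List.flatMap_map,
          List.append_assoc]
      rw [hflat]
      have hlast : (((xs.map String.toList).flatMap (fun u => u ++ ['-']) ++ t.toList) ++ ['-']).getLast? = some '-' :=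
        List.getLast?_concat
      rw [if_pos ⟨by simp, hlast⟩]
      rw [List.dropLast_concat]
      have hj : PySem.Str.join "-" (xs.concat t)
          = String.ofList (PySem.Chars.join ['-'] ((xs.map String.toList) ++ [t.toList])) := by
        simp [PySem.Str.join, List.concat_eq_append]
      rw [hj, pvJoin]
  · rw [if_pos hc]
    obtain ⟨a, ha⟩ := Option.isSome_iff_exists.mp (List.getLast?_isSome.mpr hc)
    have hane : a ≠ '-' := hcur a (List.mem_of_getLast? ha)
    have hcond : (pvRender ts1 cur1).getLast? = some a := by rw [pvRenderLast ts1 cur1 hc, ha]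
    rw [if_neg (by rw [hcond]; simp [hane])]
    have hj : PySem.Str.join "-" (ts1 ++ [String.ofList cur1])
        = String.ofList (PySem.Chars.join ['-'] ((ts1.map String.toList) ++ [cur1])) := by
      simp [PySem.Str.join]
    rw [hj, pvJoin]
    simp [pvRender, List.flatMap_map]
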